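-- pv_equiv track=rewrite | github.com/m-ttaylor/spongemock | spongemock.py | mock2
-- ===== SOURCE A (Python) =====
-- def flip(word):
--     rtn = []
--     for i in word:
--         if i.upper() == i:
--             rtn.append(i.lower())
--         else:
--             rtn.append(i.upper())
--     return ''.join(rtn)
--
-- def mock2(string):
--     rtn = ''
--     letter_count = 1
--     string = string.lower()
--     for char in string:
--         if letter_count%2==0:
--             rtn += flip(char)
--         else:
--             rtn += char
--         if char != " ":
--             letter_count += 1
--     return rtn
-- ===== SOURCE B (Python) =====
-- def mock2(string):
--     s = string.lower()
--     letters = [c for c in s if c != ' ']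
--     transformed = [c.upper() if j % 2 == 1 else c for j, c in enumerate(letters)]
--     it = iter(transformed)
--     return ''.join(c if c == ' ' else next(it) for c in s)
-- ===== Notes on version B (the rewrite author's own statement) =====
-- stated objective: alternative
-- what changed: A's single stateful pass with a letter counter is replaced by a build-then-merge decomposition: lowercase, filter out spaces, case the letters by their index parity via enumerate, then merge the spaces back in a second pass.
import Mathlib
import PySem

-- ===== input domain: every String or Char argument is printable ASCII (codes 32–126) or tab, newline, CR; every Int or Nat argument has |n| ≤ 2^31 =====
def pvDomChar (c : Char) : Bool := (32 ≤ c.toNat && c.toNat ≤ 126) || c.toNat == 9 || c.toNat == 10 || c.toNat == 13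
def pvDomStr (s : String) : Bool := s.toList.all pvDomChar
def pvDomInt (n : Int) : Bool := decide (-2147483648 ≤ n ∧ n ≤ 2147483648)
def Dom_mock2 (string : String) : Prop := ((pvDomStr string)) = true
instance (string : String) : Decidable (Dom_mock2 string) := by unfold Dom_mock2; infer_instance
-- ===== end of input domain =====

-- B replaces A's single stateful counter-pass by a build-then-merge decomposition
-- (case the non-space characters by index parity, then merge the spaces back in); objective: alternative.

-- ===== PORT A =====
-- flip(word): per-character case flip, building a list and joining.
def pyFlip (word : List Char) : List Char :=
  word.foldl
    (fun rtn i =>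
      if PySem.Chars.upperChar i = i then rtn ++ [PySem.Chars.lowerChar i]
      else rtn ++ [PySem.Chars.upperChar i]) []

def mock2 (string : String) : String :=
  let s := PySem.Chars.lower string.toList
  let r := s.foldl
    (fun (st : List Char × Int) char =>
      let rtn := if PySem.Int.mod st.2 2 = 0 then st.1 ++ pyFlip [char] else st.1 ++ [char]
      let lc := if char ≠ ' ' then st.2 + 1 else st.2
      (rtn, lc)) ([], 1)
  String.ofList r.1

-- ===== PORT B =====
-- transformed = [c.upper() if j % 2 == 1 else c for j, c in enumerate(letters)]
def mock2Transform (letters : List Char) : List Char :=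
  (PySem.List.enumerate letters 0).map
    (fun p => if PySem.Int.mod p.1 2 = 1 then PySem.Chars.upperChar p.2 else p.2)

-- ''.join(c if c == ' ' else next(it) for c in s); the [] branch of ts is unreachable
-- (transformed has exactly one element per non-space char of s).
def mock2Merge : List Char → List Char → List Char
  | [], _ => []
  | c :: rest, ts =>
    if c = ' ' then c :: mock2Merge rest ts
    else
      match ts with
      | [] => c :: mock2Merge rest []
      | t :: ts' => t :: mock2Merge rest ts'

def mock2_alt (string : String) : String :=
  let s := PySem.Chars.lower string.toList
  let letters := s.filter (fun c => c ≠ ' ')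
  String.ofList (mock2Merge s (mock2Transform letters))

-- ===== PRECONDITION & SPEC =====
def Spec_mock2 (string : String) (out : String) : Prop := out = mock2_alt string
instance (string : String) (out : String) : Decidable (Spec_mock2 string out) := by unfold Spec_mock2; infer_instance

-- ===== CLAIM (what is proved, stated in full; the proofs are below) =====
def Claim_equal_mock2 : Prop := ∀ (string : String), Dom_mock2 string → Spec_mock2 string (mock2 string)

-- ===== LEMMAS AND PROOFS =====

-- A's loop body, with the accumulator factored out.
def mock2Body : List Char → Int → List Char
  | [], _ => []
  | c :: cs, lc =>
    (if PySem.Int.mod lc 2 = 0 then pyFlip [c] else [c]) ++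
      mock2Body cs (if c ≠ ' ' then lc + 1 else lc)

lemma mock2_foldl_eq (cs : List Char) (rtn : List Char) (lc : Int) :
    cs.foldl
      (fun (st : List Char × Int) char =>
        let rtn := if PySem.Int.mod st.2 2 = 0 then st.1 ++ pyFlip [char] else st.1 ++ [char]
        let lc := if char ≠ ' ' then st.2 + 1 else st.2
        (rtn, lc)) (rtn, lc)
      = (rtn ++ mock2Body cs lc,
         cs.foldl (fun a c => if c ≠ ' ' then a + 1 else a) lc) := by
  induction cs generalizing rtn lc with
  | nil => simp [mock2Body]
  | cons c cs ih =>
    simp only [List.foldl_cons, mock2Body]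
    rw [ih]
    split_ifs <;> simp

-- Char facts (ASCII case mapping)
lemma char_le_iff (a b : Char) : a ≤ b ↔ a.toNat ≤ b.toNat := by
  rw [Char.le_def, UInt32.le_iff_toNat_le]
  exact Iff.rfl

lemma char_toNat_ofNat (n : Nat) (h : n < 55296) : (Char.ofNat n).toNat = n := by
  have hv : n.isValidChar := Or.inl h
  simp only [Char.ofNat, hv, reduceDIte, Char.ofNatAux]
  simp [Char.toNat, UInt32.toNat_ofNatLT]

lemma char_ne_of_toNat_ne (c d : Char) (h : c.toNat ≠ d.toNat) : c ≠ d := by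
  intro e; exact h (by rw [e])

lemma isupper_iff (c : Char) : PySem.Chars.isupper c = true ↔ 65 ≤ c.toNat ∧ c.toNat ≤ 90 := by
  simp only [PySem.Chars.isupper, Bool.and_eq_true, decide_eq_true_eq,
    char_le_iff 'A' c, char_le_iff c 'Z']
  exact Iff.rfl

lemma islower_iff (c : Char) : PySem.Chars.islower c = true ↔ 97 ≤ c.toNat ∧ c.toNat ≤ 122 := by
  simp only [PySem.Chars.islower, Bool.and_eq_true, decide_eq_true_eq,
    char_le_iff 'a' c, char_le_iff c 'z']
  exact Iff.rfl

-- on a char produced by lowerChar, A's flip is exactly upperChar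
lemma pyFlip_lowerChar (c : Char) :
    pyFlip [PySem.Chars.lowerChar c] = [PySem.Chars.upperChar (PySem.Chars.lowerChar c)] := by
  simp only [pyFlip, List.foldl_cons, List.foldl_nil, List.nil_append]
  by_cases hu : PySem.Chars.isupper c = true
  · -- c is uppercase: lowerChar c is a lowercase letter, whose upperChar differs from it
    have hb := (isupper_iff c).mp hu
    have hd : (PySem.Chars.lowerChar c).toNat = c.toNat + 32 := by
      simp only [PySem.Chars.lowerChar, hu, if_true]
      exact char_toNat_ofNat _ (by omega)
    have hld : PySem.Chars.islower (PySem.Chars.lowerChar c) = true :=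
      (islower_iff _).mpr (by omega)
    have hne : PySem.Chars.upperChar (PySem.Chars.lowerChar c) ≠ PySem.Chars.lowerChar c := by
      apply char_ne_of_toNat_ne
      simp only [PySem.Chars.upperChar, hld, if_true]
      rw [char_toNat_ofNat _ (by omega)]
      omega
    rw [if_neg hne]
  · -- c is not uppercase: lowerChar c = c
    have hd : PySem.Chars.lowerChar c = c := by
      simp [PySem.Chars.lowerChar, hu]
    rw [hd]
    by_cases hl : PySem.Chars.islower c = true
    · have hb := (islower_iff c).mp hl
      have hne : PySem.Chars.upperChar c ≠ c := by
        apply char_ne_of_toNat_ne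
        simp only [PySem.Chars.upperChar, hl, if_true]
        rw [char_toNat_ofNat _ (by omega)]
        omega
      rw [if_neg hne]
    · have hup : PySem.Chars.upperChar c = c := by
        simp [PySem.Chars.upperChar, hl]
      rw [if_pos hup, hup, hd]

lemma parity_flip (j : Int) : PySem.Int.mod (j + 1) 2 = 0 ↔ PySem.Int.mod j 2 = 1 := by
  rw [show PySem.Int.mod (j + 1) 2 = (j + 1) % 2 from PySem.Int.mod_eq_emod_of_pos (by omega),
    show PySem.Int.mod j 2 = j % 2 from PySem.Int.mod_eq_emod_of_pos (by omega)]
  omega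

-- core: A's body on a lowered list = B's merge of the parity-cased letters
lemma body_eq_merge (cs : List Char) (j : Int)
    (hl : ∀ c ∈ cs, pyFlip [c] = [PySem.Chars.upperChar c]) :
    mock2Body cs (j + 1) =
      mock2Merge cs
        ((PySem.List.enumerate (cs.filter (fun c => c ≠ ' ')) j).map
          (fun p => if PySem.Int.mod p.1 2 = 1 then PySem.Chars.upperChar p.2 else p.2)) := by
  induction cs generalizing j with
  | nil => simp [mock2Body, mock2Merge]
  | cons c cs ih =>
    have ih' := fun (k : Int) => ih k (fun d hd => hl d (List.mem_cons_of_mem _ hd))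
    by_cases hc : c = ' '
    · subst hc
      have hflip : pyFlip [' '] = [' '] := by decide
      rw [List.filter_cons_of_neg (by simp)]
      simp only [mock2Body, mock2Merge, hflip, ite_self, reduceIte]
      simp only [List.singleton_append, List.cons.injEq, true_and]
      exact ih' j
    · rw [List.filter_cons_of_pos (by simpa using hc), PySem.List.enumerate_cons, List.map_cons]
      simp only [mock2Body, mock2Merge, if_neg hc, if_pos hc]
      by_cases hp : PySem.Int.mod j 2 = 1
      · rw [if_pos ((parity_flip j).mpr hp), if_pos hp, hl c List.mem_cons_self]
        simp only [List.singleton_append, List.cons.injEq, true_and]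
        exact ih' (j + 1)
      · rw [if_neg (fun h => hp ((parity_flip j).mp h)), if_neg hp]
        simp only [List.singleton_append, List.cons.injEq, true_and]
        exact ih' (j + 1)

-- ===== VERDICT (by name: the statement is the Claim_ definition above) =====
theorem mock2_spec : Claim_equal_mock2 := by
  intro s _
  unfold Spec_mock2 mock2 mock2_alt mock2Transform
  simp only [mock2_foldl_eq, List.nil_append]
  congr 1
  have hl : ∀ c ∈ PySem.Chars.lower s.toList, pyFlip [c] = [PySem.Chars.upperChar c] := by
    intro c hc
    simp only [PySem.Chars.lower, List.mem_map] at hc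
    obtain ⟨d, _, rfl⟩ := hc
    exact pyFlip_lowerChar d
  simpa using body_eq_merge (PySem.Chars.lower s.toList) 0 hl
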